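-- pv_equiv track=rewrite | github.com/YacineCC/UNI | L2/GOVACATION/I33/TP4/ex3.py | eval_poly_F2
-- ===== SOURCE A (Python) =====
-- def eval_poly_F2(P,b):
-- 	s = P[-1]
-- 	i = len(P)-2
-- 	while i >= 0:
--
--
-- 		s = s & b
-- 		s = s  ^ P[i]
-- 		i -= 1
--
--
--
-- 	return s
-- ===== SOURCE B (Python) =====
-- def eval_poly_F2(P, b):
--     # Over F2 with &-as-multiply, b & b == b, so b**i collapses to b for i >= 1:
--     # the Horner loop equals P[0] ^ ((P[1] ^ ... ^ P[-1]) & b).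
--     acc = 0
--     for c in P[1:]:
--         acc ^= c
--     return P[0] ^ (acc & b)
-- ===== Notes on version B (the rewrite author's own statement) =====
-- stated objective: simpler
-- what changed: Replaces the Horner-style descending-index while loop (an & and an ^ per step) by a single forward XOR accumulation of P[1:] followed by one closed-form combination P[0] ^ (acc & b) (exact because b & b == b collapses every power of b to b); measured ~1.9x faster at large n (one bit-op per element instead of two, no index arithmetic).
import Mathlib
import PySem

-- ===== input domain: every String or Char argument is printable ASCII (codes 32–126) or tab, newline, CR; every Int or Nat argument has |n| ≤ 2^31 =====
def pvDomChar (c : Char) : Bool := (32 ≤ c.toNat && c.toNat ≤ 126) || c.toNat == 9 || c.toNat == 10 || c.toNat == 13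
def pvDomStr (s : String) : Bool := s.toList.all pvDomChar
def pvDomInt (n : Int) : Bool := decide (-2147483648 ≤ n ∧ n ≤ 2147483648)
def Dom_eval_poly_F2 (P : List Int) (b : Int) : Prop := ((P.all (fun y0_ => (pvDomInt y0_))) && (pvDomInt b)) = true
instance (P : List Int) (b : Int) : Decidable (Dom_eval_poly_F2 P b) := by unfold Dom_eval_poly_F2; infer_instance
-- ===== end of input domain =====

-- B replaces A's Horner-style descending while loop by one forward XOR pass over P[1:]
-- plus the closed form P[0] ^ (acc & b), exact because b & b = b collapses all powers of b.


-- ===== PORT A =====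
-- the while loop: fuel n+1 means current index i = n; each step does s = (s & b) ^ P[i], i -= 1
def evalA_loop (P : List Int) (b : Int) : Nat → Int → Int
  | 0, s => s
  | n+1, s => evalA_loop P b n (PySem.Int.bxor (PySem.Int.band s b) (PySem.List.pyGetD P (n : Int) 0))

def eval_poly_F2 (P : List Int) (b : Int) : Int :=
  -- s = P[-1] (IndexError on empty P: excluded by Pre_); i runs len(P)-2 .. 0
  evalA_loop P b (P.length - 1) (PySem.List.pyGetD P (-1) 0)

-- ===== PORT B =====
def eval_poly_F2_alt (P : List Int) (b : Int) : Int :=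
  -- acc = XOR of P[1:], then P[0] ^ (acc & b)  (P[0] raises on empty P: excluded by Pre_)
  PySem.Int.bxor (PySem.List.pyGetD P 0 0)
    (PySem.Int.band ((PySem.List.slice P (some 1) none).foldl (fun a c => PySem.Int.bxor a c) 0) b)

-- ===== PRECONDITION & SPEC =====
-- Pre_ excludes only the empty list, on which both Pythons raise IndexError (P[-1] / P[0]).
def Pre_eval_poly_F2 (P : List Int) (b : Int) : Prop := P ≠ []
instance (P : List Int) (b : Int) : Decidable (Pre_eval_poly_F2 P b) := by unfold Pre_eval_poly_F2; infer_instance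
def pvWitness_eval_poly_F2 : List Int × Int := ([5, 3, -7], 6)

def Spec_eval_poly_F2 (P : List Int) (b : Int) (out : Int) : Prop := out = eval_poly_F2_alt P b
instance (P : List Int) (b : Int) (out : Int) : Decidable (Spec_eval_poly_F2 P b out) := by unfold Spec_eval_poly_F2; infer_instance

-- ===== CLAIM (what is proved, stated in full; the proofs are below) =====
def Claim_equal_eval_poly_F2 : Prop := ∀ (P : List Int) (b : Int), Dom_eval_poly_F2 P b → Pre_eval_poly_F2 P b → Spec_eval_poly_F2 P b (eval_poly_F2 P b)

-- ===== LEMMAS AND PROOFS =====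

-- For a submask c of m (c &&& m = c), subtraction is XOR.
lemma pv_sub_submask : ∀ m c : Nat, c &&& m = c → m - c = m ^^^ c := by
  intro m
  induction m using Nat.strong_induction_on with
  | _ m ih =>
    intro c h
    rcases Nat.eq_zero_or_pos m with hm | hm
    · subst hm
      have : c = 0 := by simpa using h.symm
      subst this; rfl
    · have h2 : c / 2 &&& m / 2 = c / 2 := by rw [← Nat.and_div_two, h]
      have ihm := ih (m / 2) (by omega) (c / 2) h2
      have hle : c ≤ m := h ▸ Nat.and_le_right
      have hle2 : c / 2 ≤ m / 2 := h2 ▸ Nat.and_le_right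
      have hb0 : (c.testBit 0 && m.testBit 0) = c.testBit 0 := by
        rw [← Nat.testBit_and, h]
      have hbit : c % 2 = 1 → m % 2 = 1 := by
        intro h1
        by_contra h0
        have hm0 : m % 2 = 0 := by omega
        have hct : c.testBit 0 = true := Nat.mod_two_eq_one_iff_testBit_zero.mp h1
        have hmf : m.testBit 0 = false := Nat.mod_two_eq_zero_iff_testBit_zero.mp hm0
        rw [hct, hmf] at hb0
        simp at hb0
      have hx2 : (m ^^^ c) / 2 = m / 2 - c / 2 := by
        rw [Nat.xor_div_two, ← ihm]
      have hxm : (m ^^^ c) % 2 = (m + c) % 2 := Nat.xor_mod_two_eq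
      omega

lemma pv_sub_and_eq_ldiff (m n : Nat) : m - (m &&& n) = Nat.ldiff m n := by
  have h : (m &&& n) &&& m = m &&& n := by
    apply Nat.eq_of_testBit_eq
    intro k
    simp only [Nat.testBit_and]
    cases m.testBit k <;> cases n.testBit k <;> rfl
  rw [pv_sub_submask m (m &&& n) h]
  apply Nat.eq_of_testBit_eq
  intro k
  simp only [Nat.testBit_xor, Nat.testBit_and, Nat.testBit_ldiff]
  cases m.testBit k <;> cases n.testBit k <;> rfl

lemma pv_band_eq_land (a b : Int) : PySem.Int.band a b = Int.land a b := by
  rcases a with m | m <;> rcases b with n | n <;> simp [PySem.Int.band, Int.land] <;>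
    first
      | exact pv_sub_and_eq_ldiff m n
      | exact pv_sub_and_eq_ldiff n m
      | (rw [Int.negSucc_eq]; ring)

lemma pv_bxor_eq_xor (a b : Int) : PySem.Int.bxor a b = Int.xor a b := by
  rcases a with m | m <;> rcases b with n | n <;> simp [PySem.Int.bxor, Int.xor] <;>
    (rw [Int.negSucc_eq]; ring)

lemma pv_bxor_assoc (a b c : Int) :
    PySem.Int.bxor (PySem.Int.bxor a b) c = PySem.Int.bxor a (PySem.Int.bxor b c) := by
  rw [pv_bxor_eq_xor, pv_bxor_eq_xor, pv_bxor_eq_xor, pv_bxor_eq_xor]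
  rcases a with A | A <;> rcases b with B | B <;> rcases c with C | C <;>
    simp [Int.xor, Nat.xor_assoc]

-- the F2 collapse: b & ((s & b) ^ y) = b & (s ^ y)
lemma pv_key (b s y : Int) :
    PySem.Int.band b (PySem.Int.bxor (PySem.Int.band s b) y)
      = PySem.Int.band b (PySem.Int.bxor s y) := by
  rw [pv_band_eq_land, pv_band_eq_land, pv_band_eq_land, pv_bxor_eq_xor, pv_bxor_eq_xor]
  rcases b with B | B <;> rcases s with S | S <;> rcases y with Y | Y <;>
    simp only [Int.land, Int.xor] <;>
    (first
      | rfl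
      | (congr 1;
         apply Nat.eq_of_testBit_eq; intro k;
         simp only [Nat.testBit_and, Nat.testBit_xor, Nat.testBit_ldiff, Nat.testBit_or];
         cases B.testBit k <;> cases S.testBit k <;> cases Y.testBit k <;> rfl))

lemma pv_zero_bxor (a : Int) : PySem.Int.bxor 0 a = a := by
  rw [PySem.Int.bxor_comm]; exact PySem.Int.bxor_zero a

lemma pv_step (b s X r : Int) :
    PySem.Int.band b (PySem.Int.bxor X (PySem.Int.bxor (PySem.Int.band s b) r))
      = PySem.Int.band b (PySem.Int.bxor (PySem.Int.bxor X r) s) := by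
  have h1 : PySem.Int.bxor X (PySem.Int.bxor (PySem.Int.band s b) r)
      = PySem.Int.bxor (PySem.Int.band s b) (PySem.Int.bxor X r) := by
    rw [PySem.Int.bxor_comm (PySem.Int.band s b) r, ← pv_bxor_assoc,
        PySem.Int.bxor_comm (PySem.Int.bxor X r) (PySem.Int.band s b)]
  rw [h1, pv_key, PySem.Int.bxor_comm s (PySem.Int.bxor X r)]

lemma pv_loop_char (p : Int) (rest : List Int) (b : Int) :
    ∀ f s, f ≤ rest.length →
      evalA_loop (p :: rest) b (f + 1) s
        = PySem.Int.bxor p (PySem.Int.band b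
            (PySem.Int.bxor ((rest.take f).foldl (fun a c => PySem.Int.bxor a c) 0) s)) := by
  intro f
  induction f with
  | zero =>
    intro s _
    show evalA_loop (p :: rest) b 0 _ = _
    simp only [evalA_loop, List.take_zero, List.foldl_nil]
    rw [PySem.List.pyGetD_natCast]
    simp only [List.getD_cons_zero]
    rw [pv_zero_bxor, PySem.Int.bxor_comm, PySem.Int.band_comm]
  | succ f ihf =>
    intro s hf
    show evalA_loop (p :: rest) b (f + 1) _ = _
    have hget : PySem.List.pyGetD (p :: rest) ((f + 1 : Nat) : Int) 0 = rest[f] := by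
      rw [PySem.List.pyGetD_natCast]
      rw [List.getD_cons_succ]
      exact List.getD_eq_getElem rest 0 (by omega)
    rw [hget]
    rw [ihf _ (by omega)]
    have htake : rest.take (f + 1) = rest.take f ++ [rest[f]] := by
      rw [List.take_add_one]
      congr 1
      rw [List.getElem?_eq_getElem (by omega)]
      rfl
    rw [htake, List.foldl_append]
    simp only [List.foldl_cons, List.foldl_nil]
    exact congrArg (PySem.Int.bxor p)
      (pv_step b s ((rest.take f).foldl (fun a c => PySem.Int.bxor a c) 0) rest[f])

-- ===== VERDICT (by name: the statement is the Claim_ definition above) =====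
theorem eval_poly_F2_spec : Claim_equal_eval_poly_F2 := by
  intro P b _ hpre
  unfold Spec_eval_poly_F2
  rcases P with _ | ⟨p, rest⟩
  · exact absurd rfl hpre
  · unfold eval_poly_F2 eval_poly_F2_alt
    rw [PySem.List.slice_from_one]
    simp only [List.length_cons, Nat.add_sub_cancel, List.tail_cons]
    have hget0 : PySem.List.pyGetD (p :: rest) 0 0 = p := by
      rw [show (0 : Int) = ((0 : Nat) : Int) from rfl, PySem.List.pyGetD_natCast]
      rfl
    rw [hget0]
    rcases rest with _ | ⟨r, rs⟩
    · -- single-element list: zero loop iterations, s = P[-1] = p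
      show PySem.List.pyGetD [p] (-1) 0 = _
      rw [show (-1 : Int) = -((1 : Nat) : Int) by norm_num,
          PySem.List.pyGetD_neg_natCast [p] 1 0 (by omega) (by simp)]
      simp only [List.foldl_nil]
      rw [PySem.Int.band_comm, PySem.Int.band_zero, PySem.Int.bxor_zero]
      rfl
    · -- at least two elements: the loop runs; s0 = last element
      have hs0 : PySem.List.pyGetD (p :: r :: rs) (-1) 0 = (r :: rs)[rs.length] := by
        rw [show (-1 : Int) = -((1 : Nat) : Int) by norm_num,
            PySem.List.pyGetD_neg_natCast (p :: r :: rs) 1 0 (by omega) (by simp)]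
        simp only [List.length_cons, Nat.add_sub_cancel]
        exact List.getElem_cons_succ p (r :: rs) rs.length (by simp)
      rw [hs0]
      rw [show (r :: rs).length = rs.length + 1 from by simp]
      rw [pv_loop_char p (r :: rs) b rs.length _ (by simp)]
      have htake : (r :: rs).take (rs.length + 1) = (r :: rs).take rs.length ++ [(r :: rs)[rs.length]] := by
        rw [List.take_add_one]
        congr 1
        rw [List.getElem?_eq_getElem (by simp)]
        rfl
      have hfold : (r :: rs).foldl (fun a c => PySem.Int.bxor a c) 0
          = PySem.Int.bxor (((r :: rs).take rs.length).foldl (fun a c => PySem.Int.bxor a c) 0) ((r :: rs)[rs.length]) := by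
        conv_lhs => rw [show (r :: rs) = (r :: rs).take (rs.length + 1) from by simp, htake]
        rw [List.foldl_append]
        simp only [List.foldl_cons, List.foldl_nil]
      rw [hfold, PySem.Int.band_comm]
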